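-- pv_equiv track=rewrite | github.com/shex1627/shudaizi-mcp | mcp_server/src/shudaizi_mcp/knowledge_manager.py | _add_items_to_section
-- ===== SOURCE A (Python) =====
-- def _add_items_to_section(
--     lines: list[str], section: str, content: str
-- ) -> list[str]:
--     """Add items to a specific section of the checklist."""
--     result = []
--     found = False
--     inserted = False
--
--     for i, line in enumerate(lines):
--         result.append(line)
--         if not found and line.startswith("## ") and section.lower() in line.lower():
--             found = True
--             continue
--         if found and not inserted:
--             # Find the end of the current section's items
--             if line.startswith("## ") or (line.strip() == "" and i + 1 < len(lines) and lines[i + 1].startswith("## ")):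
--                 # Insert before the next section
--                 new_items = content.strip().split("\n")
--                 result = result[:-1] + new_items + ["", line]
--                 inserted = True
--
--     # If section found but we reached end of file
--     if found and not inserted:
--         result.append("")
--         result.extend(content.strip().split("\n"))
--
--     # If section not found, append as new section
--     if not found:
--         result.append("")
--         result.append(f"## {section}")
--         result.extend(content.strip().split("\n"))
--
--     return result
-- ===== SOURCE B (Python) =====
-- def _add_items_to_section(
--     lines: list[str], section: str, content: str
-- ) -> list[str]:
--     """Add items to a specific section of the checklist."""
--     items = content.strip().split("\n")
--     header = next(
--         (i for i, line in enumerate(lines)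
--          if line.startswith("## ") and section.lower() in line.lower()),
--         None,
--     )
--     if header is None:
--         return lines + ["", f"## {section}"] + items
--     for j in range(header + 1, len(lines)):
--         line = lines[j]
--         if line.startswith("## ") or (
--             line.strip() == "" and j + 1 < len(lines) and lines[j + 1].startswith("## ")
--         ):
--             return lines[:j] + items + [""] + lines[j:]
--     return lines + [""] + items
-- ===== Notes on version B (the rewrite author's own statement) =====
-- stated objective: simpler
-- what changed: A threads found/inserted flags through one pass and patches its accumulated result in place; B first locates the header index and the section-boundary index, then builds the output with a single slice splice (or one of the three tail forms), with early returns and no mutable flags.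
import Mathlib
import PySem

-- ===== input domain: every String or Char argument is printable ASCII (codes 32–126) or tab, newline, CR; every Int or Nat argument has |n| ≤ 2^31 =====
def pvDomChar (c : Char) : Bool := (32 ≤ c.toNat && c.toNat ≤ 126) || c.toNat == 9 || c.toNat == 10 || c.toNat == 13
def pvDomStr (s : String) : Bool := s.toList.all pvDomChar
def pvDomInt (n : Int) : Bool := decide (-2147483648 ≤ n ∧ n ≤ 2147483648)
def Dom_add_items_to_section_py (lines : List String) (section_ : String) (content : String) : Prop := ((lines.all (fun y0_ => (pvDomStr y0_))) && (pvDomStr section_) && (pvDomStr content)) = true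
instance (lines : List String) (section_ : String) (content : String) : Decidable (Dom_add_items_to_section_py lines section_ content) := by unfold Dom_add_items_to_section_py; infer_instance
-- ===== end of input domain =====

-- B replaces A's one-pass flag machine (found/inserted + patching the accumulated result)
-- by locating the header index and the section-boundary index first and splicing the list
-- once; objective: simpler. Equivalence is proved on all inputs (both functions are total).

-- ===== PORT A =====
-- content.strip().split("\n"); sep "\n" ≠ "" so split? is always some
def pvItems (content : String) : List String :=
  (PySem.Str.split? (PySem.Str.strip content) "\n").getD []

-- line.startswith("## ") and section.lower() in line.lower()
def pvIsHeader (section_ line : String) : Bool :=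
  PySem.Str.startswith line "## " &&
    PySem.Str.isIn (PySem.Str.lower section_) (PySem.Str.lower line)

-- line.startswith("## ") or (line.strip() == "" and i+1 < len(lines) and lines[i+1].startswith("## "))
-- (the i+1 < len guard makes the pyGet? always some; the getD "" default is never taken)
def pvIsBoundary (lines : List String) (i : Nat) (line : String) : Bool :=
  PySem.Str.startswith line "## " ||
    (PySem.Str.strip line == "" && decide (i + 1 < lines.length) &&
      PySem.Str.startswith ((PySem.List.pyGet? lines ((i : Int) + 1)).getD "") "## ")

-- the 'for i, line in enumerate(lines)' loop of A, state (result, found, inserted)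
def pvLoopA (lines : List String) (section_ content : String) :
    List String → Nat → List String → Bool → Bool → (List String × Bool × Bool)
  | [], _, result, found, inserted => (result, found, inserted)
  | line :: rest, i, result, found, inserted =>
    let result := result ++ [line]
    if !found && pvIsHeader section_ line then
      pvLoopA lines section_ content rest (i + 1) result true inserted
    else if found && !inserted && pvIsBoundary lines i line then
      pvLoopA lines section_ content rest (i + 1)
        (result.dropLast ++ pvItems content ++ ["", line]) found true
    else
      pvLoopA lines section_ content rest (i + 1) result found inserted

def add_items_to_section_py (lines : List String) (section_ : String) (content : String) : List String :=
  let st := pvLoopA lines section_ content lines 0 [] false false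
  let result := st.1
  let found := st.2.1
  let inserted := st.2.2
  let result := if found && !inserted then result ++ [""] ++ pvItems content else result
  let result := if !found then result ++ ["", "## " ++ section_] ++ pvItems content else result
  result

-- ===== PORT B =====
-- the 'for j in range(header+1, len(lines))' scan of B, returning the boundary index
def pvScanB (lines : List String) : List String → Nat → Option Nat
  | [], _ => none
  | line :: rest, j => if pvIsBoundary lines j line then some j else pvScanB lines rest (j + 1)

def add_items_to_section_py_alt (lines : List String) (section_ : String) (content : String) : List String :=
  let items := pvItems content
  match lines.findIdx? (pvIsHeader section_) with
  | none => lines ++ ["", "## " ++ section_] ++ items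
  | some h =>
    match pvScanB lines (lines.drop (h + 1)) (h + 1) with
    | some j => lines.take j ++ items ++ [""] ++ lines.drop j
    | none => lines ++ [""] ++ items

-- ===== PRECONDITION & SPEC =====
def Spec_add_items_to_section_py (lines : List String) (section_ : String) (content : String) (out : List String) : Prop := out = add_items_to_section_py_alt lines section_ content
instance (lines : List String) (section_ : String) (content : String) (out : List String) : Decidable (Spec_add_items_to_section_py lines section_ content out) := by unfold Spec_add_items_to_section_py; infer_instance

-- ===== CLAIM (what is proved, stated in full; the proofs are below) =====
def Claim_equal_add_items_to_section_py : Prop := ∀ (lines : List String) (section_ : String) (content : String), Dom_add_items_to_section_py lines section_ content → Spec_add_items_to_section_py lines section_ content (add_items_to_section_py lines section_ content)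

-- ===== LEMMAS AND PROOFS =====

theorem pvScanB_le {lines : List String} :
    ∀ (suffix : List String) (i j : Nat), pvScanB lines suffix i = some j → i ≤ j := by
  intro suffix
  induction suffix with
  | nil => intro i j h; simp [pvScanB] at h
  | cons line rest ih =>
    intro i j h
    simp only [pvScanB] at h
    split at h
    · simp_all
    · have := ih (i + 1) j h; omega

-- after insertion A only copies the remaining lines
theorem pvLoopA_inserted (lines : List String) (section_ content : String) :
    ∀ (suffix : List String) (i : Nat) (result : List String),
      pvLoopA lines section_ content suffix i result true true = (result ++ suffix, true, true) := by
  intro suffix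
  induction suffix with
  | nil => intro i result; simp [pvLoopA]
  | cons line rest ih =>
    intro i result
    simp [pvLoopA, ih, List.append_assoc]

-- in the found-but-not-inserted phase A's loop is B's boundary scan plus one splice
theorem pvLoopA_found (lines : List String) (section_ content : String) :
    ∀ (suffix : List String) (i : Nat) (result : List String), lines.drop i = suffix →
      pvLoopA lines section_ content suffix i result true false =
        match pvScanB lines suffix i with
        | none => (result ++ suffix, true, false)
        | some j =>
            (result ++ suffix.take (j - i) ++ pvItems content ++ [""] ++ suffix.drop (j - i),
              true, true) := by
  intro suffix
  induction suffix with
  | nil => intro i result _; simp [pvLoopA, pvScanB]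
  | cons line rest ih =>
    intro i result hdrop
    have hrest : lines.drop (i + 1) = rest := by
      rw [← List.tail_drop, hdrop]
      rfl
    by_cases hb : pvIsBoundary lines i line = true
    · rw [show pvScanB lines (line :: rest) i = some i from by simp [pvScanB, hb]]
      simp only [pvLoopA, Bool.not_true, Bool.false_and, Bool.and_self, Bool.not_false, hb, if_true]
      rw [pvLoopA_inserted]
      simp [List.append_assoc]
    · rw [show pvScanB lines (line :: rest) i = pvScanB lines rest (i + 1) from by
        simp [pvScanB, hb]]
      simp only [pvLoopA, Bool.not_true, Bool.false_and, Bool.and_self, Bool.not_false,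
        Bool.true_and, hb]
      rw [ih (i + 1) (result ++ [line]) hrest]
      cases hscan : pvScanB lines rest (i + 1) with
      | none => simp
      | some j =>
        have hij : i + 1 ≤ j := pvScanB_le rest (i + 1) j hscan
        have h1 : j - i = (j - (i + 1)) + 1 := by omega
        simp [h1, List.append_assoc]

-- before the header is found A only copies lines; finding it hands over to the found phase
theorem pvLoopA_phase0 (lines : List String) (section_ content : String) :
    ∀ (suffix : List String) (i : Nat) (result : List String),
      pvLoopA lines section_ content suffix i result false false =
        match suffix.findIdx? (pvIsHeader section_) with
        | none => (result ++ suffix, false, false)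
        | some k =>
            pvLoopA lines section_ content (suffix.drop (k + 1)) (i + k + 1)
              (result ++ suffix.take (k + 1)) true false := by
  intro suffix
  induction suffix with
  | nil => intro i result; simp [pvLoopA]
  | cons line rest ih =>
    intro i result
    by_cases hh : pvIsHeader section_ line = true
    · simp [pvLoopA, hh, List.findIdx?_cons]
    · rw [show (line :: rest).findIdx? (pvIsHeader section_)
            = (rest.findIdx? (pvIsHeader section_)).map (· + 1) from by
        simp [List.findIdx?_cons, hh]]
      simp only [pvLoopA, hh, Bool.not_false, Bool.false_and, Bool.and_false]
      rw [ih (i + 1) (result ++ [line])]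
      cases hf : rest.findIdx? (pvIsHeader section_) with
      | none => simp
      | some k =>
        simp only [Option.map_some]
        have : (i + 1) + k + 1 = i + (k + 1) + 1 := by omega
        simp [this, List.append_assoc]

-- ===== VERDICT (by name: the statement is the Claim_ definition above) =====
theorem add_items_to_section_py_spec : Claim_equal_add_items_to_section_py := by
  intro lines section_ content _
  unfold Spec_add_items_to_section_py add_items_to_section_py add_items_to_section_py_alt
  rw [pvLoopA_phase0 lines section_ content lines 0 []]
  cases hf : lines.findIdx? (pvIsHeader section_) with
  | none => simp
  | some h =>
    simp only [Nat.zero_add, List.nil_append]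
    rw [pvLoopA_found lines section_ content (lines.drop (h + 1)) (h + 1)
      (lines.take (h + 1)) rfl]
    cases hscan : pvScanB lines (lines.drop (h + 1)) (h + 1) with
    | none => simp
    | some j =>
      have hij : h + 1 ≤ j := pvScanB_le (lines.drop (h + 1)) (h + 1) j hscan
      have htake : lines.take (h + 1) ++ (lines.drop (h + 1)).take (j - (h + 1)) = lines.take j := by
        rw [← List.take_add]
        congr 1
        omega
      have hdrop : (lines.drop (h + 1)).drop (j - (h + 1)) = lines.drop j := by
        rw [List.drop_drop]
        congr 1
        omega
      simp [htake, hdrop]
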